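-- pv_equiv track=rewrite | github.com/overmind-core/overmind | overmind/utils/policy.py | format_for_codegen
-- ===== SOURCE A (Python) =====
-- def _is_two_layer(policy: dict) -> bool:
--     """Check whether the policy uses the new two-layer format."""
--     return "domain_rules" in policy
--
-- def _get_constraints(policy: dict) -> list[str]:
--     """Get hard/output constraints regardless of format."""
--     if _is_two_layer(policy):
--         return policy.get("output_constraints", [])
--     return policy.get("hard_constraints", [])
--
-- def format_for_codegen(policy: dict) -> str:
--     """Minimal policy context for the codegen prompt.
--
--     Output constraints + tool requirements so generated code respects them.
--     """
--     if not policy: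
--         return ""
--
--     lines: list[str] = []
--
--     constraints = _get_constraints(policy)
--     if constraints:
--         lines.append("Output constraints the agent must satisfy:")
--         for c in constraints:
--             lines.append(f"  - {c}")
--
--     tool_reqs = policy.get("tool_requirements", [])
--     if tool_reqs:
--         if lines:
--             lines.append("")
--         lines.append("Tool requirements:")
--         for t in tool_reqs:
--             lines.append(f"  - {t}")
--
--     mapping = policy.get("decision_mapping", [])
--     if mapping:
--         if lines:
--             lines.append("")
--         lines.append("Decision mapping rules:")
--         for m in mapping:
--             lines.append(f"  - {m}")
--
--     return "\n".join(lines) if lines else ""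
-- ===== SOURCE B (Python) =====
-- def _is_two_layer(policy: dict) -> bool:
--     return "domain_rules" in policy
--
-- def _get_constraints(policy: dict) -> list[str]:
--     if _is_two_layer(policy):
--         return policy.get("output_constraints", [])
--     return policy.get("hard_constraints", [])
--
-- def _render(sections: list) -> str:
--     """Render back-to-front: recurse on the tail first, then prepend this
--     section's text (header plus inline "\n  - " bullets), inserting the
--     blank-line separator only when the already-rendered suffix is non-empty."""
--     if not sections:
--         return ""
--     (header, items), rest = sections[0], _render(sections[1:])
--     if not items:
--         return rest
--     block = header + "".join("\n  - " + x for x in items)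
--     return block if not rest else block + "\n\n" + rest
--
-- def format_for_codegen(policy: dict) -> str:
--     return _render([
--         ("Output constraints the agent must satisfy:", _get_constraints(policy)),
--         ("Tool requirements:", policy.get("tool_requirements", [])),
--         ("Decision mapping rules:", policy.get("decision_mapping", [])),
--     ])
-- ===== Notes on version B (the rewrite author's own statement) =====
-- stated objective: alternative
-- what changed: Replaces A's forward imperative build of a flat line list with if-lines separator bookkeeping and a final newline join by a recursive back-to-front rendering: each non-empty section's text is built by direct string concatenation (header plus inline "\n - " bullets, no line list and no join over lines) and prepended to the already-rendered suffix, with the blank-line separator decided by whether the suffix is empty.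
import Mathlib
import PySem

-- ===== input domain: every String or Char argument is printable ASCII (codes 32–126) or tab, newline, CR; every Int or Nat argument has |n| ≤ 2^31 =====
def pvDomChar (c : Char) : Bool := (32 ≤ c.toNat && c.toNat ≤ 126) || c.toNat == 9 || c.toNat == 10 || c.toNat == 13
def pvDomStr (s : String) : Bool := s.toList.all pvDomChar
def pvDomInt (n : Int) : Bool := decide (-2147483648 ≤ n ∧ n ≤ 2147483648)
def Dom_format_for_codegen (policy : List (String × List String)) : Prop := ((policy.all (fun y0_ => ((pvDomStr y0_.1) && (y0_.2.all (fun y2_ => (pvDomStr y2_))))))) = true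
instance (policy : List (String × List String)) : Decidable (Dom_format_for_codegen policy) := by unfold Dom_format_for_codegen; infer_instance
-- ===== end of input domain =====

-- B replaces A's forward flat-line-list build (with if-lines separator bookkeeping and a
-- final newline join) by a recursive back-to-front render: direct string concatenation per
-- section, separator decided by the already-rendered suffix (objective: alternative).

-- shared module helpers (both Source A and Source B carry the same _is_two_layer/_get_constraints/.get logic)
-- dict.get(k, []) on an association list: first match, default []
def fcg_getD (policy : List (String × List String)) (k : String) : List String :=
  match policy with
  | [] => []
  | (k', v) :: rest => if k' == k then v else fcg_getD rest k

-- '"domain_rules" in policy'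
def fcg_isTwoLayer (policy : List (String × List String)) : Bool :=
  policy.any (fun kv => kv.1 == "domain_rules")

def fcg_getConstraints (policy : List (String × List String)) : List String :=
  if fcg_isTwoLayer policy then fcg_getD policy "output_constraints"
  else fcg_getD policy "hard_constraints"

-- ===== PORT A =====
def format_for_codegen (policy : List (String × List String)) : String :=
  if policy.isEmpty then ""
  else
    let lines : List String := []
    let constraints := fcg_getConstraints policy
    let lines :=
      if !constraints.isEmpty then
        constraints.foldl (fun acc c => acc ++ ["  - " ++ c])
          (lines ++ ["Output constraints the agent must satisfy:"])
      else lines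
    let tool_reqs := fcg_getD policy "tool_requirements"
    let lines :=
      if !tool_reqs.isEmpty then
        let lines := if !lines.isEmpty then lines ++ [""] else lines
        tool_reqs.foldl (fun acc t => acc ++ ["  - " ++ t])
          (lines ++ ["Tool requirements:"])
      else lines
    let mapping := fcg_getD policy "decision_mapping"
    let lines :=
      if !mapping.isEmpty then
        let lines := if !lines.isEmpty then lines ++ [""] else lines
        mapping.foldl (fun acc m => acc ++ ["  - " ++ m])
          (lines ++ ["Decision mapping rules:"])
      else lines
    if !lines.isEmpty then PySem.Str.join "\n" lines else ""

-- ===== PORT B =====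
-- _render: recurse on the tail first, then prepend this section's text
-- (header + inline "\n  - " bullets, built by direct concatenation).
def fcg_render : List (String × List String) → String
  | [] => ""
  | (header, items) :: sections =>
    let rest := fcg_render sections
    if items.isEmpty then rest
    else
      let block := header ++ PySem.Str.join "" (items.map (fun x => "\n  - " ++ x))
      if rest = "" then block else block ++ "\n\n" ++ rest

def format_for_codegen_alt (policy : List (String × List String)) : String :=
  fcg_render
    [("Output constraints the agent must satisfy:", fcg_getConstraints policy),
     ("Tool requirements:", fcg_getD policy "tool_requirements"),
     ("Decision mapping rules:", fcg_getD policy "decision_mapping")]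

-- ===== PRECONDITION & SPEC =====
def Spec_format_for_codegen (policy : List (String × List String)) (out : String) : Prop := out = format_for_codegen_alt policy
instance (policy : List (String × List String)) (out : String) : Decidable (Spec_format_for_codegen policy out) := by unfold Spec_format_for_codegen; infer_instance

-- ===== CLAIM (what is proved, stated in full; the proofs are below) =====
def Claim_equal_format_for_codegen : Prop := ∀ (policy : List (String × List String)), Dom_format_for_codegen policy → Spec_format_for_codegen policy (format_for_codegen policy)

-- ===== LEMMAS AND PROOFS =====

-- the per-item append loop of A builds the mapped list
theorem fcg_foldl_items (l : List String) (items : List String) :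
    items.foldl (fun acc c => acc ++ ["  - " ++ c]) l
      = l ++ items.map (fun c => "  - " ++ c) := by
  induction items generalizing l with
  | nil => simp
  | cons x xs ih => simp [List.foldl_cons, ih]

theorem fcg_cjoin_append (sep : List Char) (a b : List (List Char))
    (ha : a ≠ []) (hb : b ≠ []) :
    PySem.Chars.join sep (a ++ b)
      = PySem.Chars.join sep a ++ sep ++ PySem.Chars.join sep b := by
  induction a with
  | nil => exact absurd rfl ha
  | cons x a' ih =>
    cases a' with
    | nil =>
      cases b with
      | nil => exact absurd rfl hb
      | cons y b' =>
        simp [PySem.Chars.join_cons_cons, PySem.Chars.join_singleton]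
    | cons z a'' =>
      have h := ih (by simp)
      simp only [List.cons_append] at h ⊢
      rw [PySem.Chars.join_cons_cons, PySem.Chars.join_cons_cons, h]
      simp [List.append_assoc]

-- ''.join at char level is flatten
theorem fcg_cjoin_nilsep (l : List (List Char)) : PySem.Chars.join [] l = l.flatten := by
  induction l with
  | nil => rfl
  | cons a r ih =>
    cases r with
    | nil => simp [PySem.Chars.join_singleton]
    | cons b t => rw [PySem.Chars.join_cons_cons, ih]; simp

-- '\n'.join(h :: l) pushes the separator into each later element
theorem fcg_cjoin_nl_cons (l : List (List Char)) (h : List Char) :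
    PySem.Chars.join ['\n'] (h :: l) = h ++ (l.map (fun s => '\n' :: s)).flatten := by
  induction l generalizing h with
  | nil => simp [PySem.Chars.join_singleton]
  | cons a r ih => rw [PySem.Chars.join_cons_cons, ih]; simp

-- A's newline-joined block equals B's concatenated block
theorem fcg_block_eq (h : String) (items : List String) :
    PySem.Str.join "\n" (h :: items.map (fun c => "  - " ++ c))
      = h ++ PySem.Str.join "" (items.map (fun x => "\n  - " ++ x)) := by
  apply String.toList_inj.mp
  simp only [String.toList_append, PySem.Str.toList_join, List.map_cons, List.map_map]
  rw [show ("\n" : String).toList = ['\n'] from rfl,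
      show ("" : String).toList = [] from rfl,
      fcg_cjoin_nl_cons, fcg_cjoin_nilsep]
  congr 1
  rw [List.map_map]
  refine congrArg List.flatten (List.map_congr_left ?_)
  intro x _
  simp only [Function.comp, String.toList_append]
  rw [show ("\n  - " : String).toList = '\n' :: ("  - " : String).toList from rfl]
  simp

-- A's "\n"-join across a "" separator line equals B's explicit "\n\n" concatenation
theorem fcg_sep_str (x y : List String) (hx : x ≠ []) (hy : y ≠ []) :
    PySem.Str.join "\n" (x ++ "" :: y)
      = PySem.Str.join "\n" x ++ "\n\n" ++ PySem.Str.join "\n" y := by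
  apply String.toList_inj.mp
  simp only [String.toList_append, PySem.Str.toList_join, List.map_append, List.map_cons]
  rw [show ("" : String).toList = [] from rfl,
      show ("\n" : String).toList = ['\n'] from rfl,
      show ("\n\n" : String).toList = ['\n', '\n'] from rfl]
  have h1 : (([] : List Char) :: y.map String.toList) = [([] : List Char)] ++ y.map String.toList := rfl
  rw [h1, ← List.append_assoc,
      fcg_cjoin_append ['\n'] (x.map String.toList ++ [[]]) (y.map String.toList) (by simp) (by simpa),
      fcg_cjoin_append ['\n'] (x.map String.toList) [[]] (by simpa) (by simp)]
  simp [PySem.Chars.join_singleton, List.append_assoc]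

-- one-step unfolding of B's recursion
theorem fcg_render_cons (header : String) (items : List String)
    (sections : List (String × List String)) :
    fcg_render ((header, items) :: sections)
      = if items.isEmpty then fcg_render sections
        else if fcg_render sections = "" then
          header ++ PySem.Str.join "" (items.map (fun x => "\n  - " ++ x))
        else
          header ++ PySem.Str.join "" (items.map (fun x => "\n  - " ++ x)) ++ "\n\n" ++
            fcg_render sections := rfl

theorem fcg_render_nil : fcg_render [] = "" := rfl

-- a block headed by a nonempty header is a nonempty string
theorem fcg_append_ne (h s : String) (hh : h.toList ≠ []) : h ++ s ≠ "" := by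
  intro e
  apply hh
  have := congrArg String.toList e
  rw [String.toList_append, show ("" : String).toList = [] from rfl] at this
  exact (List.append_eq_nil_iff.mp this).1

-- a three-fold append headed by a nonempty header is a nonempty string
theorem fcg_append_ne3 (h s t u : String) (hh : h.toList ≠ []) : ((h ++ s) ++ t) ++ u ≠ "" := by
  intro e
  apply hh
  have := congrArg String.toList e
  simp only [String.toList_append, show ("" : String).toList = [] from rfl,
    List.append_eq_nil_iff] at this
  exact this.1.1.1

-- cons form of fcg_block_eq, matching the goals after case analysis
theorem fcg_block_eq' (h x : String) (xs : List String) :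
    PySem.Str.join "\n" (h :: ("  - " ++ x) :: xs.map (fun c => "  - " ++ c))
      = h ++ PySem.Str.join "" (("\n  - " ++ x) :: xs.map (fun c => "\n  - " ++ c)) := by
  have := fcg_block_eq h (x :: xs)
  simpa using this

theorem format_for_codegen_eq (policy : List (String × List String)) :
    format_for_codegen policy = format_for_codegen_alt policy := by
  by_cases hp : policy.isEmpty
  · have hnil : policy = [] := List.isEmpty_iff.mp hp
    subst hnil
    simp [format_for_codegen, format_for_codegen_alt, fcg_render, fcg_getConstraints,
      fcg_isTwoLayer, fcg_getD]
  · simp only [format_for_codegen, format_for_codegen_alt, hp, Bool.false_eq_true, if_false]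
    generalize fcg_getConstraints policy = cs
    generalize fcg_getD policy "tool_requirements" = ts
    generalize fcg_getD policy "decision_mapping" = ms
    rcases cs with _ | ⟨c, cs⟩ <;> rcases ts with _ | ⟨t, ts⟩ <;> rcases ms with _ | ⟨m, ms⟩ <;>
      simp only [List.isEmpty_nil, List.isEmpty_cons, Bool.not_true, Bool.not_false,
        Bool.false_eq_true, if_true, if_false, fcg_foldl_items, List.nil_append,
        List.cons_append, List.map_cons,
        fcg_render_cons, fcg_render_nil]
    -- one nonempty section: single block
    · exact fcg_block_eq' _ _ _
    · exact fcg_block_eq' _ _ _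
    -- tool requirements + decision mapping
    · rw [if_neg (fcg_append_ne "Decision mapping rules:" _ (by decide)),
          ← fcg_block_eq', ← fcg_block_eq',
          ← fcg_sep_str ("Tool requirements:" :: ("  - " ++ t) :: ts.map (fun c => "  - " ++ c))
            ("Decision mapping rules:" :: ("  - " ++ m) :: ms.map (fun c => "  - " ++ c))
            (by simp) (by simp)]
      exact congrArg (PySem.Str.join "\n") (by simp)
    · exact fcg_block_eq' _ _ _
    -- output constraints + decision mapping
    · rw [if_neg (fcg_append_ne "Decision mapping rules:" _ (by decide)),
          ← fcg_block_eq', ← fcg_block_eq',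
          ← fcg_sep_str ("Output constraints the agent must satisfy:" :: ("  - " ++ c) :: cs.map (fun c => "  - " ++ c))
            ("Decision mapping rules:" :: ("  - " ++ m) :: ms.map (fun c => "  - " ++ c))
            (by simp) (by simp)]
      exact congrArg (PySem.Str.join "\n") (by simp)
    -- output constraints + tool requirements
    · rw [if_neg (fcg_append_ne "Tool requirements:" _ (by decide)),
          ← fcg_block_eq', ← fcg_block_eq',
          ← fcg_sep_str ("Output constraints the agent must satisfy:" :: ("  - " ++ c) :: cs.map (fun c => "  - " ++ c))
            ("Tool requirements:" :: ("  - " ++ t) :: ts.map (fun c => "  - " ++ c))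
            (by simp) (by simp)]
      exact congrArg (PySem.Str.join "\n") (by simp)
    -- all three sections nonempty
    · rw [if_neg (fcg_append_ne "Decision mapping rules:" _ (by decide)),
          if_neg (fcg_append_ne3 "Tool requirements:" _ _ _ (by decide)),
          ← fcg_block_eq', ← fcg_block_eq', ← fcg_block_eq',
          ← fcg_sep_str ("Tool requirements:" :: ("  - " ++ t) :: ts.map (fun c => "  - " ++ c))
            ("Decision mapping rules:" :: ("  - " ++ m) :: ms.map (fun c => "  - " ++ c))
            (by simp) (by simp),
          ← fcg_sep_str ("Output constraints the agent must satisfy:" :: ("  - " ++ c) :: cs.map (fun c => "  - " ++ c))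
            (("Tool requirements:" :: ("  - " ++ t) :: ts.map (fun c => "  - " ++ c)) ++
              "" :: ("Decision mapping rules:" :: ("  - " ++ m) :: ms.map (fun c => "  - " ++ c)))
            (by simp) (by simp)]
      exact congrArg (PySem.Str.join "\n") (by simp)

-- ===== VERDICT (by name: the statement is the Claim_ definition above) =====
theorem format_for_codegen_spec : Claim_equal_format_for_codegen := by
  intro policy _
  unfold Spec_format_for_codegen
  exact format_for_codegen_eq policy
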